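-- pv_equiv track=rewrite | github.com/Shinnybest/algorithm | programmers/없는숫자더하기.py | solution
-- ===== SOURCE A (Python) =====
-- def solution(numbers):
--     zero_to_nine = [0, 1, 2, 3, 4, 5, 6, 7, 8, 9]
--     for number in numbers:
--         if number in zero_to_nine:
--             zero_to_nine.remove(number)
--
--     answer = 0
--
--     for i in range(len(zero_to_nine)):
--         answer += zero_to_nine[i]
--
--     return answer
-- ===== SOURCE B (Python) =====
-- def solution(numbers):
--     present = set(numbers)
--     return sum(d for d in range(10) if d not in present)
-- ===== Notes on version B (the rewrite author's own statement) =====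
-- stated objective: simpler
-- what changed: Instead of mutating a [0..9] list while scanning the input and then summing by index, B builds a set of the input once and sums the digits 0-9 absent from it in a single pass over the fixed digit domain.
import Mathlib
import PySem

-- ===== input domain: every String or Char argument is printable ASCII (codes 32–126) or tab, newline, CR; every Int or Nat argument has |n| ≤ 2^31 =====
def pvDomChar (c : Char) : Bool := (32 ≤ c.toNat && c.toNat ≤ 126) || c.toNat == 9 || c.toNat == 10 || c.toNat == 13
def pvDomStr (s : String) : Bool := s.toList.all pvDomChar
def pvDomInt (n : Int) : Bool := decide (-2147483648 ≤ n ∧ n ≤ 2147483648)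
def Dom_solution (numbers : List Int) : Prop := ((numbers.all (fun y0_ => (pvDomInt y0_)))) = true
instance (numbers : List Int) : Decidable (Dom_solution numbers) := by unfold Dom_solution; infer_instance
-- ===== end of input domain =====

-- B replaces A's mutation of a [0..9] list while scanning the input by one pass over the
-- fixed digit domain 0..9, summing the digits absent from a set built from the input.

-- ===== PORT A =====
-- `zero_to_nine.remove(number)` is only executed under `number in zero_to_nine`,
-- so `remove?` always succeeds there; `.getD z` is exact on that guarded path.
def solution (numbers : List Int) : Int :=
  let zero_to_nine : List Int :=
    numbers.foldl
      (fun z n => if n ∈ z then (PySem.List.remove? z n).getD z else z)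
      [0, 1, 2, 3, 4, 5, 6, 7, 8, 9]
  (PySem.List.pyRange 0 zero_to_nine.length 1).foldl
    (fun answer i => answer + PySem.List.pyGetD zero_to_nine i 0) 0

-- ===== PORT B =====
def solution_alt (numbers : List Int) : Int :=
  let present : PySem.Set Int := PySem.Set.ofList numbers
  (PySem.List.pyRange 0 10 1).foldl
    (fun acc d => if d ∈ present then acc else acc + d) 0

-- ===== PRECONDITION & SPEC =====
def Spec_solution (numbers : List Int) (out : Int) : Prop := out = solution_alt numbers
instance (numbers : List Int) (out : Int) : Decidable (Spec_solution numbers out) := by unfold Spec_solution; infer_instance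

-- ===== CLAIM (what is proved, stated in full; the proofs are below) =====
def Claim_equal_solution : Prop := ∀ (numbers : List Int), Dom_solution numbers → Spec_solution numbers (solution numbers)

-- ===== LEMMAS AND PROOFS =====

-- A's first loop, from any duplicate-free state z, filters out of z the elements of ns.
lemma a_fold_filter (ns : List Int) :
    ∀ (z : List Int), z.Nodup →
      ns.foldl (fun z n => if n ∈ z then (PySem.List.remove? z n).getD z else z) z
        = z.filter (fun d => decide (d ∉ ns)) := by
  induction ns with
  | nil => intro z _; simp
  | cons n ns ih =>
    intro z hz
    by_cases hmem : n ∈ z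
    · rw [List.foldl_cons]
      simp only [hmem, if_pos, PySem.List.remove?_eq_some_erase z n hmem, Option.getD_some]
      rw [ih (z.erase n) (hz.erase n), List.Nodup.erase_eq_filter hz]
      rw [List.filter_filter]
      apply List.filter_congr
      intro d _
      by_cases hd : d = n <;> simp [hd]
    · rw [List.foldl_cons]
      simp only [hmem, if_neg, not_false_iff]
      rw [ih z hz]
      have : z.filter (fun d => decide (d ∉ n :: ns))
          = (z.filter (fun d => decide (d ≠ n))).filter (fun d => decide (d ∉ ns)) := by
        rw [List.filter_filter]
        apply List.filter_congr
        intro d _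
        by_cases hd : d = n <;> simp [hd]
      rw [this]
      congr 1
      symm
      apply (List.filter_eq_self).2
      intro d hd
      simp only [decide_eq_true_eq]
      intro h; exact hmem (h ▸ hd)

-- summing with an if-guard is summing the filtered list
lemma foldl_if_sum (P : Int → Prop) [DecidablePred P] (L : List Int) :
    ∀ (acc : Int),
      L.foldl (fun acc d => if P d then acc else acc + d) acc
        = acc + (L.filter (fun d => decide (¬ P d))).sum := by
  induction L with
  | nil => intro acc; simp
  | cons x L ih =>
    intro acc
    by_cases hx : P x <;> simp [hx, ih, add_assoc]

lemma foldl_add_sum (L : List Int) : ∀ (acc : Int),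
    L.foldl (fun a d => a + d) acc = acc + L.sum := by
  induction L with
  | nil => intro acc; simp
  | cons x L ih => intro acc; simp [ih, add_assoc]

-- ===== VERDICT (by name: the statement is the Claim_ definition above) =====
theorem solution_spec : Claim_equal_solution := by
  intro numbers _
  unfold Spec_solution solution solution_alt
  have hz : ([0, 1, 2, 3, 4, 5, 6, 7, 8, 9] : List Int).Nodup := by norm_num
  rw [a_fold_filter numbers _ hz]
  rw [PySem.List.foldl_pyRange_zero_pyGetD' _ 0 (fun a d => a + d) 0]
  rw [foldl_add_sum, foldl_if_sum (fun d => d ∈ PySem.Set.ofList numbers)]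
  have hrange : PySem.List.pyRange 0 10 1 = ([0,1,2,3,4,5,6,7,8,9] : List Int) := by
    norm_num [PySem.List.pyRange_one_cons, PySem.List.pyRange_one_eq_nil]
  rw [hrange]
  simp only [zero_add]
  congr 1
  apply List.filter_congr
  intro d _
  simp [PySem.Set.mem_ofList]
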